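-- pv_equiv track=rewrite | github.com/nermadie/CodeForces_Solutions | CodeforcesRound905Div3/prob02.py | is_possible_palindrome
-- ===== SOURCE A (Python) =====
-- def is_possible_palindrome(s, k):
--     char_count = {}
--
--     for char in s:
--         char_count[char] = char_count.get(char, 0) + 1
--
--     odd_count = sum(1 for count in char_count.values() if count % 2 != 0)
--
--     if odd_count > k + 1:
--         return "NO"
--     else:
--         return "YES"
-- ===== SOURCE B (Python) =====
-- def is_possible_palindrome(s, k):
--     t = sorted(s)
--     n = len(t)
--     odd = 0
--     i = 0
--     while i < n:
--         j = i + 1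
--         while j < n and t[j] == t[i]:
--             j += 1
--         if (j - i) % 2 == 1:
--             odd += 1
--         i = j
--     return "NO" if odd > k + 1 else "YES"
-- ===== Notes on version B (the rewrite author's own statement) =====
-- stated objective: alternative
-- what changed: Replaces the frequency-dict build plus odd-count comprehension with a sort-then-scan algorithm: sort the characters, walk the sorted list run by run of equal characters, and count the runs of odd length; no counts or dict are ever maintained.
import Mathlib
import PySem

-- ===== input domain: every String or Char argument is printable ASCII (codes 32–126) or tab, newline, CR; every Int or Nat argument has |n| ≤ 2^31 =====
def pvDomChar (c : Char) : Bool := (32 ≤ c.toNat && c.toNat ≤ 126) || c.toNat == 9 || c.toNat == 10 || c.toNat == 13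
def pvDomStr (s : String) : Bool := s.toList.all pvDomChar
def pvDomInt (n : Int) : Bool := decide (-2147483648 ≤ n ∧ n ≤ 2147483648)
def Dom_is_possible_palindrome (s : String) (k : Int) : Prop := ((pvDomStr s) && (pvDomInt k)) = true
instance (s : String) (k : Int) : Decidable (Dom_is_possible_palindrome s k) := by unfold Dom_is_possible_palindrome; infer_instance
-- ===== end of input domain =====

-- B replaces A's frequency-dict + odd-count comprehension with a different algorithm:
-- sort the characters and scan the sorted list run by run, counting runs of odd length.


-- ===== PORT A =====
def is_possible_palindrome (s : String) (k : Int) : String :=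
  let char_count : PySem.Dict Char Int :=
    s.toList.foldl (fun d c => d.insert c (d.getD c 0 + 1)) PySem.Dict.empty
  let odd_count : Int :=
    (char_count.values.map (fun count => if PySem.Int.mod count 2 ≠ 0 then (1 : Int) else 0)).sum
  if odd_count > k + 1 then "NO" else "YES"

-- ===== PORT B =====
-- outer while loop of Source B: each step consumes one maximal run of equal characters
-- (the inner while advancing j past the run is the takeWhile/dropWhile split; the
-- run length j - i is 1 + the number of immediately following equal characters)
def pvRunScan : List Char → Int
  | [] => 0
  | c :: rest =>
      (if (1 + (rest.takeWhile (fun x => x == c)).length) % 2 = 1 then (1 : Int) else 0)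
        + pvRunScan (rest.dropWhile (fun x => x == c))
termination_by l => l.length
decreasing_by
  simp only [List.length_cons]
  have := List.length_dropWhile_le (fun x => x == c) rest
  omega

def is_possible_palindrome_alt (s : String) (k : Int) : String :=
  let t := PySem.List.sorted s.toList (fun c => c) false
  let odd := pvRunScan t
  if odd > k + 1 then "NO" else "YES"

-- ===== PRECONDITION & SPEC =====
def Spec_is_possible_palindrome (s : String) (k : Int) (out : String) : Prop := out = is_possible_palindrome_alt s k
instance (s : String) (k : Int) (out : String) : Decidable (Spec_is_possible_palindrome s k out) := by unfold Spec_is_possible_palindrome; infer_instance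

-- ===== CLAIM (what is proved, stated in full; the proofs are below) =====
def Claim_equal_is_possible_palindrome : Prop := ∀ (s : String) (k : Int), Dom_is_possible_palindrome s k → Spec_is_possible_palindrome s k (is_possible_palindrome s k)

-- ===== LEMMAS AND PROOFS =====

-- the number of distinct characters occurring an odd number of times
def pvOddCard (l : List Char) : Nat :=
  ((PySem.Set.ofList l).filter (fun c => l.count c % 2 == 1)).length

-- A's odd_count equals pvOddCard
theorem a_odd_count (l : List Char) :
    (((PySem.Dict.counter l : PySem.Dict Char Int).values.map
        (fun count => if PySem.Int.mod count 2 ≠ 0 then (1 : Int) else 0)).sum)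
      = (pvOddCard l : Int) := by
  unfold pvOddCard
  rw [PySem.Dict.values_eq_map_keys _ (PySem.Dict.nodup_keys_counter l) 0,
    PySem.Dict.keys_counter]
  rw [List.map_map]
  have hfun : ((fun count => if PySem.Int.mod count 2 ≠ 0 then (1 : Int) else 0) ∘
      fun k => (PySem.Dict.counter l).getD k 0)
      = fun c => if (l.count c % 2 == 1 : Bool) then (1 : Int) else 0 := by
    funext c
    simp only [Function.comp, PySem.Dict.getD_counter]
    rw [show (2 : Int) = ((2 : Nat) : Int) from rfl, PySem.Int.mod_natCast]
    by_cases h : l.count c % 2 = 1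
    · simp [h]
    · have h0 : l.count c % 2 = 0 := by omega
      simp [h0]
  rw [hfun, PySem.List.sum_map_ite_one_zero, List.countP_eq_length_filter]

-- pvOddCard is invariant under permutation
theorem pvOddCard_perm {l l' : List Char} (h : l.Perm l') : pvOddCard l = pvOddCard l' := by
  unfold pvOddCard
  have hN : ((PySem.Set.ofList l).filter (fun c => l.count c % 2 == 1)).Nodup :=
    (PySem.Set.nodup_ofList l).filter _
  have hN' : ((PySem.Set.ofList l').filter (fun c => l'.count c % 2 == 1)).Nodup :=
    (PySem.Set.nodup_ofList l').filter _
  refine ((List.perm_ext_iff_of_nodup hN hN').mpr ?_).length_eq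
  intro x
  simp only [List.mem_filter, PySem.Set.mem_ofList, beq_iff_eq, h.mem_iff, h.count_eq]

-- in a sorted list, the head's character never reappears after its run
theorem not_mem_dropWhile_head : ∀ (rest : List Char) (c : Char),
    (c :: rest).Pairwise (· ≤ ·) → c ∉ rest.dropWhile (fun x => x == c) := by
  intro rest
  induction rest with
  | nil => intro c _ h; simp at h
  | cons x xs ih =>
    intro c hp
    by_cases hx : (x == c) = true
    · rw [List.dropWhile_cons, if_pos hx]
      apply ih
      have hcx : c = x := (beq_iff_eq.mp hx).symm
      subst hcx
      exact hp.sublist (by simp)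
    · rw [List.dropWhile_cons, if_neg hx]
      intro hmem
      rcases List.mem_cons.mp hmem with h | h
      · exact hx (by simp [h])
      · have h1 : c ≤ x := (List.pairwise_cons.mp hp).1 x (List.mem_cons_self)
        have hp2 : (x :: xs).Pairwise (· ≤ ·) := (List.pairwise_cons.mp hp).2
        have h2 : x ≤ c := (List.pairwise_cons.mp hp2).1 c h
        exact hx (by simp [le_antisymm h2 h1])

-- one run step of pvOddCard on a sorted list
theorem pvOddCard_cons (c : Char) (rest : List Char) (hp : (c :: rest).Pairwise (· ≤ ·)) :
    pvOddCard (c :: rest)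
      = (if (1 + (rest.takeWhile (fun x => x == c)).length) % 2 = 1 then 1 else 0)
        + pvOddCard (rest.dropWhile (fun x => x == c)) := by
  set tw := rest.takeWhile (fun x => x == c) with htw
  set dw := rest.dropWhile (fun x => x == c) with hdw
  have hsplit : rest = tw ++ dw := (List.takeWhile_append_dropWhile).symm
  have htwc : ∀ x ∈ tw, x = c := by
    intro x hx
    exact beq_iff_eq.mp (List.mem_takeWhile_imp (p := fun y => y == c) (l := rest) hx)
  have hcdw : c ∉ dw := not_mem_dropWhile_head rest c hp
  have hcount_c : (c :: rest).count c = 1 + tw.length := by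
    rw [hsplit, List.count_cons_self, List.count_append]
    have h1 : tw.count c = tw.length := List.count_eq_length.mpr (fun b hb => by simp [htwc b hb])
    have h2 : dw.count c = 0 := List.count_eq_zero.mpr hcdw
    omega
  have hcount_ne : ∀ x, x ≠ c → (c :: rest).count x = dw.count x := by
    intro x hx
    rw [hsplit, List.count_cons_of_ne (Ne.symm hx), List.count_append]
    have h1 : tw.count x = 0 := List.count_eq_zero.mpr (fun hm => hx (htwc x hm))
    omega
  -- the filtered distinct lists on both sides are Nodup with the same members
  have hN : ((PySem.Set.ofList (c :: rest)).filter
      (fun x => (c :: rest).count x % 2 == 1)).Nodup :=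
    (PySem.Set.nodup_ofList _).filter _
  have hNdwf : ((PySem.Set.ofList dw).filter (fun x => dw.count x % 2 == 1)).Nodup :=
    (PySem.Set.nodup_ofList dw).filter _
  have hN' : ((if (1 + tw.length) % 2 = 1 then [c] else [])
      ++ (PySem.Set.ofList dw).filter (fun x => dw.count x % 2 == 1)).Nodup := by
    split_ifs
    · refine List.nodup_append.mpr ⟨List.nodup_singleton c, hNdwf, ?_⟩
      intro a ha b hb hab
      rw [List.mem_singleton] at ha
      subst ha; subst hab
      exact hcdw ((PySem.Set.mem_ofList _ _).mp (List.mem_filter.mp hb).1)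
    · simpa using hNdwf
  have hperm : ((PySem.Set.ofList (c :: rest)).filter
        (fun x => (c :: rest).count x % 2 == 1)).Perm
      ((if (1 + tw.length) % 2 = 1 then [c] else [])
        ++ (PySem.Set.ofList dw).filter (fun x => dw.count x % 2 == 1)) := by
    refine (List.perm_ext_iff_of_nodup hN hN').mpr ?_
    intro x
    simp only [List.mem_filter, PySem.Set.mem_ofList, beq_iff_eq, List.mem_append]
    by_cases hx : x = c
    · subst hx
      have hmem : x ∈ x :: rest := List.mem_cons_self
      have hnot : ¬ (x ∈ dw ∧ dw.count x % 2 = 1) := fun h => hcdw h.1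
      rw [hcount_c]
      constructor
      · intro h
        left
        split_ifs with hodd
        · simp
        · exact absurd h.2 hodd
      · intro h
        rcases h with h | h
        · split_ifs at h with hodd
          · exact ⟨hmem, hodd⟩
          · simp at h
        · exact absurd h hnot
    · rw [hcount_ne x hx]
      have hmemiff : x ∈ c :: rest ↔ x ∈ dw := by
        rw [hsplit]
        simp only [List.mem_cons, List.mem_append]
        constructor
        · rintro (h | h | h)
          · exact absurd h hx
          · exact absurd (htwc x h) hx
          · exact h
        · intro h; right; right; exact h
      have hnotc : x ∉ (if (1 + tw.length) % 2 = 1 then [c] else ([] : List Char)) := by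
        split_ifs <;> simp [hx]
      rw [hmemiff]
      constructor
      · intro h; right; exact h
      · intro h
        rcases h with h | h
        · exact absurd h hnotc
        · exact h
  have hlen := hperm.length_eq
  rw [List.length_append] at hlen
  unfold pvOddCard
  rw [hlen]
  split_ifs <;> simp

-- B's run scan counts the odd-frequency characters of a sorted list
theorem pvRunScan_eq (l : List Char) (hp : l.Pairwise (· ≤ ·)) :
    pvRunScan l = (pvOddCard l : Int) := by
  induction l using pvRunScan.induct with
  | case1 => simp [pvRunScan, pvOddCard, PySem.Set.ofList]
  | case2 c rest ih =>
    have hpdw : (rest.dropWhile (fun x => x == c)).Pairwise (· ≤ ·) :=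
      ((List.pairwise_cons.mp hp).2).sublist (List.dropWhile_sublist _)
    rw [pvRunScan, pvOddCard_cons c rest hp, ih hpdw]
    push_cast
    split_ifs <;> ring

-- ===== VERDICT (by name: the statement is the Claim_ definition above) =====
theorem is_possible_palindrome_spec : Claim_equal_is_possible_palindrome := by
  intro s k _
  unfold Spec_is_possible_palindrome
  simp only [is_possible_palindrome, is_possible_palindrome_alt]
  rw [PySem.Dict.foldl_insert_getD_add_one_eq_counter, a_odd_count,
    pvRunScan_eq _ (by simpa using PySem.List.sorted_pairwise s.toList (fun c => c) : _),
    pvOddCard_perm (PySem.List.sorted_perm s.toList (fun c => c) false)]
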